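-- pv_equiv track=rewrite | github.com/vecchp/CrackingTheCodingInterview | chapter8/question8_4.py | bin_to_set
-- ===== SOURCE A (Python) =====
-- def bin_to_set(number, lst):
--     i = 0
--     output = []
--     while number != 0:
--         if number & ~(~0 << 1):
--             output.append(lst[i])
--         number >>= 1
--         i += 1
--     return ''.join(output)
-- ===== SOURCE B (Python) =====
-- def bin_to_set(number, lst):
--     output = []
--     while number != 0:
--         rest = number & (number - 1)   # number with its lowest set bit cleared
--         low = number - rest            # the lowest set bit itself (a power of two)
--         output.append(lst[low.bit_length() - 1])
--         number = rest
--     return ''.join(output)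
-- ===== Notes on version B (the rewrite author's own statement) =====
-- stated objective: alternative
-- what changed: B iterates only over the set bits, repeatedly clearing the lowest set bit with number & (number - 1) and indexing the list by that bit's bit_length() - 1, instead of A's per-bit scan that tests and shifts every bit position.
import Mathlib
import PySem

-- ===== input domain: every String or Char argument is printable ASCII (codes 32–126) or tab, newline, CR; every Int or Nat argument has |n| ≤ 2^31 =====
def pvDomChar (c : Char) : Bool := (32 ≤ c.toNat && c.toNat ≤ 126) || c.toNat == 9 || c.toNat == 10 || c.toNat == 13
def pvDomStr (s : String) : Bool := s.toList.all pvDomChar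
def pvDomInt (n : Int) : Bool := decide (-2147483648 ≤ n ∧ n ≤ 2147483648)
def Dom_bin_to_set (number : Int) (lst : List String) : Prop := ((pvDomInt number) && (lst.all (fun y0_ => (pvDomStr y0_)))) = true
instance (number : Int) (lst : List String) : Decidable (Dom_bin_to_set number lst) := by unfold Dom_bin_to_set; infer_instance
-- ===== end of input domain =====

-- B iterates only over the set bits of `number` (clearing the lowest set bit each round and
-- indexing by its bit_length) instead of scanning every bit position one by one; alternative
-- decomposition, same exact return value on all inputs where A returns.

-- ===== PORT A =====
-- termination helper for the A-side loop (cited by decreasing_by)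
theorem pvFloordivTwoLt (number : Int) (h : ¬ number ≤ 0) :
    (PySem.Int.floordiv number 2).toNat < number.toNat := by
  rw [PySem.Int.floordiv_eq_ediv_of_pos (by omega)]
  omega

-- Python: while number != 0 — for number < 0 that loop never terminates (Pre_ excludes those);
-- the guard `number ≤ 0` only makes the recursion total, on 0 < number it is Python's condition.
def binToSetLoop (lst : List String) (number : Int) (i : Nat) (output : List String) : List String :=
  if h : number ≤ 0 then output
  else
    -- `number & ~(~0 << 1)` transliterated; `number >>= 1` on ints is floor division by 2
    binToSetLoop lst (PySem.Int.floordiv number 2) (i + 1)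
      (if PySem.Int.band number (Int.not (Int.not 0 <<< 1)) ≠ 0 then
        -- lst[i]: IndexError when i ≥ len lst (excluded by Pre_); default "" never used inside Pre_
        output ++ [(PySem.List.pyGet? lst (i : Int)).getD ""]
      else output)
termination_by number.toNat
decreasing_by exact pvFloordivTwoLt number h

def bin_to_set (number : Int) (lst : List String) : String :=
  PySem.Str.join "" (binToSetLoop lst number 0 [])

-- ===== PORT B =====
-- termination helper for the B-side loop (cited by decreasing_by)
theorem pvBandPredLt (number : Int) (h : ¬ number ≤ 0) :
    (PySem.Int.band number (number - 1)).toNat < number.toNat := by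
  obtain ⟨n, rfl⟩ : ∃ n : Nat, number = (n : Int) :=
    ⟨number.toNat, (Int.toNat_of_nonneg (by omega)).symm⟩
  have hn : 0 < n := by exact_mod_cast (by omega : (0:Int) < (n:Int))
  have hc : ((n : Int) - 1) = ((n - 1 : Nat) : Int) := by omega
  rw [hc, PySem.Int.band_natCast]
  have hle := Nat.and_le_right (n := n) (m := n - 1)
  simp only [Int.toNat_natCast]
  omega

-- Python: while number != 0 — negatives diverge (Pre_ excludes them); guard as in port A.
def binToSetAltLoop (lst : List String) (number : Int) (output : List String) : List String :=
  if h : number ≤ 0 then output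
  else
    let rest := PySem.Int.band number (number - 1)
    let low := number - rest
    -- lst[low.bit_length() - 1]: PySem.Int.bitLength is Python's int.bit_length (low ≥ 1 here)
    binToSetAltLoop lst rest
      (output ++ [(PySem.List.pyGet? lst ((PySem.Int.bitLength low - 1 : Nat) : Int)).getD ""])
termination_by number.toNat
decreasing_by exact pvBandPredLt number h

def bin_to_set_alt (number : Int) (lst : List String) : String :=
  PySem.Str.join "" (binToSetAltLoop lst number [])

-- ===== PRECONDITION & SPEC =====
-- A raises IndexError when a set bit's position is ≥ len(lst) (i.e. number ≥ 2^len(lst)) and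
-- loops forever on number < 0; Pre_ admits exactly the inputs on which A returns normally.
def Pre_bin_to_set (number : Int) (lst : List String) : Prop :=
  0 ≤ number ∧ number < 2 ^ lst.length
instance (number : Int) (lst : List String) : Decidable (Pre_bin_to_set number lst) := by
  unfold Pre_bin_to_set; infer_instance

def pvWitness_bin_to_set : Int × List String := (5, ["a", "b", "c"])

def Spec_bin_to_set (number : Int) (lst : List String) (out : String) : Prop := out = bin_to_set_alt number lst
instance (number : Int) (lst : List String) (out : String) : Decidable (Spec_bin_to_set number lst out) := by unfold Spec_bin_to_set; infer_instance

-- ===== CLAIM (what is proved, stated in full; the proofs are below) =====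
def Claim_equal_bin_to_set : Prop := ∀ (number : Int) (lst : List String), Dom_bin_to_set number lst → Pre_bin_to_set number lst → Spec_bin_to_set number lst (bin_to_set number lst)

-- ===== LEMMAS AND PROOFS =====

-- the list of entries A picks, as a function of the remaining value n and current bit index i
def pvF (lst : List String) (n i : Nat) : List String :=
  if h : n = 0 then []
  else (if n % 2 = 1 then [(PySem.List.pyGet? lst (i : Int)).getD ""] else []) ++ pvF lst (n / 2) (i + 1)
termination_by n
decreasing_by exact Nat.div_lt_self (Nat.pos_of_ne_zero h) one_lt_two

-- parity of a bitwise and via testBit 0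
theorem pvAndModTwoRight (n m : Nat) (h : m % 2 = 0) : (n &&& m) % 2 = 0 := by
  rw [← Nat.and_one_is_mod, Nat.and_assoc, Nat.and_one_is_mod, h, Nat.and_zero]

theorem pvAndModTwoLeft (n m : Nat) (h : n % 2 = 0) : (n &&& m) % 2 = 0 := by
  rw [Nat.and_comm]
  exact pvAndModTwoRight m n h

-- clearing the lowest set bit, odd case: n & (n-1) = n - 1
theorem pvClearOdd (k : Nat) : (2 * k + 1) &&& (2 * k) = 2 * k := by
  have hd : ((2 * k + 1) &&& (2 * k)) / 2 = k := by
    rw [Nat.and_div_two]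
    have h1 : (2 * k + 1) / 2 = k := by omega
    have h2 : (2 * k) / 2 = k := by omega
    rw [h1, h2, Nat.and_self]
  have hm : ((2 * k + 1) &&& (2 * k)) % 2 = 0 := pvAndModTwoRight _ _ (by omega)
  omega

-- clearing the lowest set bit, even case: (2k) & (2k-1) = 2 * (k & (k-1))
theorem pvClearEven (k : Nat) (hk : 0 < k) : (2 * k) &&& (2 * k - 1) = 2 * (k &&& (k - 1)) := by
  have hd : ((2 * k) &&& (2 * k - 1)) / 2 = k &&& (k - 1) := by
    rw [Nat.and_div_two]
    have h1 : (2 * k) / 2 = k := by omega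
    have h2 : (2 * k - 1) / 2 = k - 1 := by omega
    rw [h1, h2]
  have hm : ((2 * k) &&& (2 * k - 1)) % 2 = 0 := pvAndModTwoLeft _ _ (by omega)
  omega

theorem pvBitLengthPos (m : Nat) (hm : 0 < m) : 0 < PySem.Int.bitLength (m : Int) := by
  rw [PySem.Int.bitLength_natCast (m := m) hm]
  omega

-- A's loop accumulates pvF
theorem pvLoopAEq (lst : List String) : ∀ (n : Nat) (i : Nat) (acc : List String),
    binToSetLoop lst (n : Int) i acc = acc ++ pvF lst n i := by
  intro n
  induction n using Nat.strong_induction_on with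
  | _ n ih =>
    intro i acc
    rw [binToSetLoop, pvF]
    by_cases h : n = 0
    · subst h; simp
    · have h0 : ¬ ((n : Int) ≤ 0) := by
        have : 0 < n := Nat.pos_of_ne_zero h
        omega
      rw [dif_neg h0, dif_neg h]
      have hmask : Int.not (Int.not 0 <<< 1) = 1 := by decide
      have hband : PySem.Int.band (n : Int) 1 = PySem.Int.mod (n : Int) 2 := PySem.Int.band_one _
      have hmod : PySem.Int.mod (n : Int) 2 = ((n % 2 : Nat) : Int) := by
        exact_mod_cast PySem.Int.mod_natCast n 2
      have hdiv : PySem.Int.floordiv (n : Int) 2 = ((n / 2 : Nat) : Int) := by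
        exact_mod_cast PySem.Int.floordiv_natCast n 2
      rw [hmask, hband, hmod, hdiv, ih (n / 2) (Nat.div_lt_self (Nat.pos_of_ne_zero h) one_lt_two)]
      by_cases hp : n % 2 = 1
      · rw [if_pos (by rw [hp]; simp), if_pos hp, List.append_assoc]
      · have hp0 : n % 2 = 0 := by omega
        rw [if_neg (by rw [hp0]; simp), if_neg hp]
        simp

-- the list of entries B picks, as a function of the remaining value n
def pvG (lst : List String) (n : Nat) : List String :=
  if h : n = 0 then []
  else (PySem.List.pyGet? lst ((PySem.Int.bitLength ((n - (n &&& (n - 1)) : Nat) : Int) - 1 : Nat) : Int)).getD ""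
         :: pvG lst (n &&& (n - 1))
termination_by n
decreasing_by
  have := Nat.and_le_right (n := n) (m := n - 1)
  omega

-- B's loop accumulates pvG
theorem pvLoopBEq (lst : List String) : ∀ (n : Nat) (acc : List String),
    binToSetAltLoop lst (n : Int) acc = acc ++ pvG lst n := by
  intro n
  induction n using Nat.strong_induction_on with
  | _ n ih =>
    intro acc
    rw [binToSetAltLoop, pvG]
    by_cases h : n = 0
    · subst h; simp
    · have hn : 0 < n := Nat.pos_of_ne_zero h
      have h0 : ¬ ((n : Int) ≤ 0) := by omega
      rw [dif_neg h0, dif_neg h]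
      have hc : ((n : Int) - 1) = ((n - 1 : Nat) : Int) := by omega
      have hband : PySem.Int.band (n : Int) ((n : Int) - 1) = ((n &&& (n - 1) : Nat) : Int) := by
        rw [hc, PySem.Int.band_natCast]
      have hle : (n &&& (n - 1)) ≤ n - 1 := Nat.and_le_right
      have hlow : (n : Int) - ((n &&& (n - 1) : Nat) : Int) = ((n - (n &&& (n - 1)) : Nat) : Int) := by
        omega
      simp only [hband, hlow]
      rw [ih (n &&& (n - 1)) (by omega)]
      simp

-- pvF on an even value just advances the bit index
theorem pvFEven (lst : List String) (c i : Nat) : pvF lst (2 * c) i = pvF lst c (i + 1) := by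
  by_cases hc : c = 0
  · subst hc; rw [pvF, pvF]; simp
  · rw [pvF]
    have h2c : ¬ (2 * c = 0) := by omega
    rw [dif_neg h2c, if_neg (by omega)]
    have : 2 * c / 2 = c := by omega
    rw [this]
    simp

-- one B-step, expressed on pvF: peeling the lowest set bit emits exactly the next entry
theorem pvStep (lst : List String) : ∀ (n : Nat), n ≠ 0 → ∀ (i : Nat),
    pvF lst n i =
      (PySem.List.pyGet? lst ((i + (PySem.Int.bitLength ((n - (n &&& (n - 1)) : Nat) : Int) - 1) : Nat) : Int)).getD ""
        :: pvF lst (n &&& (n - 1)) i := by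
  intro n
  induction n using Nat.strong_induction_on with
  | _ n ih =>
    intro hn i
    have hpos : 0 < n := Nat.pos_of_ne_zero hn
    by_cases hp : n % 2 = 1
    · -- odd: lowest set bit is bit 0
      have hk : n = 2 * (n / 2) + 1 := by omega
      have hclear : n &&& (n - 1) = n - 1 := by
        have := pvClearOdd (n / 2)
        rw [← hk] at this
        have hn1 : 2 * (n / 2) = n - 1 := by omega
        rw [hn1] at this
        exact this
      have hlow : n - (n &&& (n - 1)) = 1 := by omega
      have hbl : PySem.Int.bitLength ((1 : Nat) : Int) = 1 := by decide
      rw [pvF, dif_neg hn, if_pos hp, hlow, hbl, hclear]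
      have hi : i + (1 - 1) = i := by omega
      rw [hi]
      -- tail: pvF (n-1) i = pvF (n/2) (i+1) since n-1 = 2*(n/2)
      have ht : n - 1 = 2 * (n / 2) := by omega
      rw [ht, pvFEven]
      simp
    · -- even: recurse on n/2
      have hp0 : n % 2 = 0 := by omega
      have hk : n = 2 * (n / 2) := by omega
      set k := n / 2 with hkdef
      have hkpos : 0 < k := by omega
      have hclear : n &&& (n - 1) = 2 * (k &&& (k - 1)) := by
        rw [hk]; exact pvClearEven k hkpos
      have hlek : (k &&& (k - 1)) ≤ k - 1 := Nat.and_le_right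
      have hlow : n - (n &&& (n - 1)) = 2 * (k - (k &&& (k - 1))) := by omega
      have hlowk : 0 < k - (k &&& (k - 1)) := by omega
      have hbl : PySem.Int.bitLength ((2 * (k - (k &&& (k - 1))) : Nat) : Int)
          = PySem.Int.bitLength ((k - (k &&& (k - 1)) : Nat) : Int) + 1 := by
        have := PySem.Int.bitLength_natCast (m := 2 * (k - (k &&& (k - 1)))) (by omega)
        have hh : 2 * (k - (k &&& (k - 1))) / 2 = k - (k &&& (k - 1)) := by omega
        rw [hh] at this
        exact this
      have hblk : 0 < PySem.Int.bitLength ((k - (k &&& (k - 1)) : Nat) : Int) :=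
        pvBitLengthPos _ hlowk
      have hstep := ih k (by omega) (by omega) (i + 1)
      calc pvF lst n i = pvF lst k (i + 1) := by rw [hk, pvFEven]
        _ = _ := by
            rw [hstep, hlow, hbl, hclear, ← pvFEven lst (k &&& (k - 1)) i]
            have hidx : (i + 1) + (PySem.Int.bitLength ((k - (k &&& (k - 1)) : Nat) : Int) - 1)
                = i + (PySem.Int.bitLength ((k - (k &&& (k - 1)) : Nat) : Int) + 1 - 1) := by omega
            rw [hidx]

theorem pvGEqF (lst : List String) : ∀ (n : Nat), pvG lst n = pvF lst n 0 := by
  intro n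
  induction n using Nat.strong_induction_on with
  | _ n ih =>
    by_cases h : n = 0
    · subst h; rw [pvG, pvF]; simp
    · rw [pvG, dif_neg h, pvStep lst n h 0]
      have hle : (n &&& (n - 1)) ≤ n - 1 := Nat.and_le_right
      rw [ih (n &&& (n - 1)) (by omega)]
      simp

-- ===== VERDICT (by name: the statement is the Claim_ definition above) =====
theorem bin_to_set_spec : Claim_equal_bin_to_set := by
  intro number lst _hdom hpre
  unfold Spec_bin_to_set
  obtain ⟨hnn, _⟩ := hpre
  obtain ⟨n, rfl⟩ : ∃ n : Nat, number = (n : Int) :=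
    ⟨number.toNat, (Int.toNat_of_nonneg hnn).symm⟩
  unfold bin_to_set bin_to_set_alt
  rw [pvLoopAEq lst n 0 [], pvLoopBEq lst n [], pvGEqF]
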